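-- pv_equiv track=rewrite | github.com/smohapatra1/scripting | python/practice/start_again/2023/12292023/valid_partition_for_the_array.py | CheckValidPartition
-- ===== SOURCE A (Python) =====
-- from typing import List
--
-- def CheckValidPartition(nums: List[int]) -> bool:
--     n=len(nums)
--     if n == 1:
--         return False
--     dp = [ True, False, nums[0] == nums[1] if n > 1 else False]
--     for i in range(2, n):
--         current_dp = ( nums[i] == nums[i-1] and dp[1]) or \
--                       (nums[i] == nums[i-1] == nums[i-2] and dp[0]) or \
--                         (nums[i] - nums[i-1] == 1 and nums[i-1] - nums[i-2] == 1 and dp[0])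
--         dp[0], dp[1], dp[2] = dp[1], dp[2], current_dp
--     return dp[2]
-- ===== SOURCE B (Python) =====
-- from typing import List
--
-- def CheckValidPartition(nums: List[int]) -> bool:
--     # Bottom-up suffix DP: can[i] means nums[i:] can be partitioned into valid pieces.
--     n = len(nums)
--     if n == 0:
--         return False
--     can = {n: True}
--     for i in reversed(range(n)):
--         ok = False
--         if i + 2 <= n and nums[i] == nums[i + 1]:
--             ok = can[i + 2]
--         if not ok and i + 3 <= n and (nums[i] == nums[i + 1] == nums[i + 2]
--                 or (nums[i + 1] - nums[i] == 1 and nums[i + 2] - nums[i + 1] == 1)):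
--             ok = can[i + 3]
--         can[i] = ok
--     return can[0]
-- ===== Notes on version B (the rewrite author's own statement) =====
-- stated objective: alternative
-- what changed: Replaces A's forward rolling three-slot prefix DP (dp over prefixes, conditions looking backward at nums[i-1], nums[i-2]) by a backward suffix DP over a memo dict: can[i] says nums[i:] is partitionable, computed from i = n-1 down to 0 with forward-looking conditions.
import Mathlib
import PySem

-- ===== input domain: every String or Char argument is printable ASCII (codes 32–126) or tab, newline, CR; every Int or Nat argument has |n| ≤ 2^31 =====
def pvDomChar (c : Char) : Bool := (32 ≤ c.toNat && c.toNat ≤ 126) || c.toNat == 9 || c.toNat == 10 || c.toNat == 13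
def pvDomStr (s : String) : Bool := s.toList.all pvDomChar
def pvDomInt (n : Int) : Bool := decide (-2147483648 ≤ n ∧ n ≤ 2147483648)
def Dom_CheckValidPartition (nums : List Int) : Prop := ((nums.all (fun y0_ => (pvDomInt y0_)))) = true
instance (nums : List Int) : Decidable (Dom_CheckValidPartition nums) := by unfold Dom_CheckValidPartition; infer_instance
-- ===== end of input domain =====

-- B replaces A's forward rolling three-slot prefix DP by a backward suffix DP over a memo dict (alternative decomposition, same O(n) cost).

-- ===== PORT A =====
def CheckValidPartition (nums : List Int) : Bool :=
  let n := nums.length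
  if n = 1 then false
  else
    let dp : Bool × Bool × Bool :=
      (true, false, if 1 < n then nums.getD 0 0 == nums.getD 1 0 else false)
    let dp := (List.range' 2 (n - 2)).foldl (fun dp i =>
      let cur :=
        (nums.getD i 0 == nums.getD (i - 1) 0 && dp.2.1) ||
        ((nums.getD i 0 == nums.getD (i - 1) 0 && nums.getD (i - 1) 0 == nums.getD (i - 2) 0) && dp.1) ||
        ((nums.getD i 0 - nums.getD (i - 1) 0 == 1 && nums.getD (i - 1) 0 - nums.getD (i - 2) 0 == 1) && dp.1)
      (dp.2.1, dp.2.2, cur)) dp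
    dp.2.2

-- ===== PORT B =====
def CheckValidPartition_alt (nums : List Int) : Bool :=
  let n := nums.length
  if n = 0 then false
  else
    let can : PySem.Dict Nat Bool := PySem.Dict.empty.insert n true
    let can := (List.range n).reverse.foldl (fun can i =>
      let ok := false
      let ok := if i + 2 ≤ n && nums.getD i 0 == nums.getD (i + 1) 0 then can.getD (i + 2) false else ok
      let ok := if !ok && i + 3 ≤ n &&
          ((nums.getD i 0 == nums.getD (i + 1) 0 && nums.getD (i + 1) 0 == nums.getD (i + 2) 0) ||
           (nums.getD (i + 1) 0 - nums.getD i 0 == 1 && nums.getD (i + 2) 0 - nums.getD (i + 1) 0 == 1))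
        then can.getD (i + 3) false else ok
      can.insert i ok) can
    can.getD 0 false

-- ===== PRECONDITION & SPEC =====
def Spec_CheckValidPartition (nums : List Int) (out : Bool) : Prop := out = CheckValidPartition_alt nums
instance (nums : List Int) (out : Bool) : Decidable (Spec_CheckValidPartition nums out) := by unfold Spec_CheckValidPartition; infer_instance

-- ===== CLAIM (what is proved, stated in full; the proofs are below) =====
def Claim_equal_CheckValidPartition : Prop := ∀ (nums : List Int), Dom_CheckValidPartition nums → Spec_CheckValidPartition nums (CheckValidPartition nums)

-- ===== LEMMAS AND PROOFS =====

-- 'the list is partitionable', peeling pieces from the FRONT (B's direction)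
def canB : List Int → Bool
  | [] => true
  | [_] => false
  | [a, b] => a == b
  | a :: b :: c :: rest =>
      (a == b && canB (c :: rest)) ||
      (((a == b && b == c) || (b - a == 1 && c - b == 1)) && canB rest)

-- 'the REVERSED prefix is partitionable', peeling pieces from the BACK (A's direction; argument is the reversed prefix)
def canR : List Int → Bool
  | [] => true
  | [_] => false
  | [a, b] => a == b
  | a :: b :: c :: rest =>
      (a == b && canR (c :: rest)) ||
      (((a == b && b == c) || (a - b == 1 && b - c == 1)) && canR rest)

-- semantic partitionability
inductive CVPart : List Int → Prop
  | nil : CVPart []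
  | two {a b : Int} {r : List Int} : a = b → CVPart r → CVPart (a :: b :: r)
  | three {a b c : Int} {r : List Int} :
      ((a = b ∧ b = c) ∨ (b - a = 1 ∧ c - b = 1)) → CVPart r → CVPart (a :: b :: c :: r)

theorem canB_iff (l : List Int) : canB l = true ↔ CVPart l := by
  induction l using canB.induct with
  | case1 => simp [canB]; exact CVPart.nil
  | case2 a => simp [canB]; intro h; cases h
  | case3 a b =>
      simp only [canB, beq_iff_eq]
      constructor
      · intro h; exact CVPart.two h CVPart.nil
      · intro h; cases h with
        | two e _ => exact e
  | case4 a b c rest ih1 ih2 =>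
      simp only [canB, Bool.or_eq_true, Bool.and_eq_true, beq_iff_eq, ih1, ih2]
      constructor
      · rintro (⟨e, h⟩ | ⟨e, h⟩)
        · exact CVPart.two e h
        · exact CVPart.three e h
      · intro h
        cases h with
        | two e h => exact Or.inl ⟨e, h⟩
        | three e h => exact Or.inr ⟨e, h⟩

theorem part_append_two {m : List Int} {y x : Int} (h : CVPart m) (e : y = x) :
    CVPart (m ++ [y, x]) := by
  induction h with
  | nil => exact CVPart.two e CVPart.nil
  | two e' _ ih => exact CVPart.two e' ih
  | three e' _ ih => exact CVPart.three e' ih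

theorem part_append_three {m : List Int} {z y x : Int}
    (h : CVPart m) (e : (z = y ∧ y = x) ∨ (y - z = 1 ∧ x - y = 1)) :
    CVPart (m ++ [z, y, x]) := by
  induction h with
  | nil => exact CVPart.three e CVPart.nil
  | two e' _ ih => exact CVPart.two e' ih
  | three e' _ ih => exact CVPart.three e' ih

theorem part_elim {l : List Int} (h : CVPart l) :
    l = [] ∨
    (∃ m y x, l = m ++ [y, x] ∧ y = x ∧ CVPart m) ∨
    (∃ m z y x, l = m ++ [z, y, x] ∧ ((z = y ∧ y = x) ∨ (y - z = 1 ∧ x - y = 1)) ∧ CVPart m) := by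
  induction h with
  | nil => exact Or.inl rfl
  | @two a b r e _ ih =>
      rcases ih with rfl | ⟨m, y, x, rfl, e2, hm⟩ | ⟨m, z, y, x, rfl, e3, hm⟩
      · exact Or.inr (Or.inl ⟨[], a, b, rfl, e, CVPart.nil⟩)
      · exact Or.inr (Or.inl ⟨a :: b :: m, y, x, rfl, e2, CVPart.two e hm⟩)
      · exact Or.inr (Or.inr ⟨a :: b :: m, z, y, x, rfl, e3, CVPart.two e hm⟩)
  | @three a b c r e _ ih =>
      rcases ih with rfl | ⟨m, y, x, rfl, e2, hm⟩ | ⟨m, z, y, x, rfl, e3, hm⟩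
      · exact Or.inr (Or.inr ⟨[], a, b, c, rfl, e, CVPart.nil⟩)
      · exact Or.inr (Or.inl ⟨a :: b :: c :: m, y, x, rfl, e2, CVPart.three e hm⟩)
      · exact Or.inr (Or.inr ⟨a :: b :: c :: m, z, y, x, rfl, e3, CVPart.three e hm⟩)

theorem canR_iff (l : List Int) : canR l = true ↔ CVPart l.reverse := by
  induction l using canR.induct with
  | case1 => simp [canR]; exact CVPart.nil
  | case2 a => simp [canR]; intro h; cases h
  | case3 a b =>
      simp only [canR, beq_iff_eq, List.reverse_cons, List.reverse_nil, List.nil_append,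
        List.cons_append]
      constructor
      · intro h; exact CVPart.two h.symm CVPart.nil
      · intro h; cases h with
        | two e _ => exact e.symm
  | case4 a b c rest ih1 ih2 =>
      have hrev : (a :: b :: c :: rest).reverse = rest.reverse ++ [c, b, a] := by
        simp
      have hrev1 : (c :: rest).reverse = rest.reverse ++ [c] := by simp
      rw [hrev]
      simp only [canR, Bool.or_eq_true, Bool.and_eq_true, beq_iff_eq, ih1, ih2, hrev1]
      constructor
      · rintro (⟨e, h⟩ | ⟨e, h⟩)
        · have := part_append_two h (y := b) (x := a) e.symm
          simpa [List.append_assoc] using this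
        · refine part_append_three h ?_
          rcases e with ⟨e1, e2⟩ | ⟨e1, e2⟩
          · exact Or.inl ⟨e2.symm, e1.symm⟩
          · exact Or.inr ⟨e2, e1⟩
      · intro h
        rcases part_elim h with hnil | ⟨m, y, x, heq, e2, hm⟩ | ⟨m, z, y, x, heq, e3, hm⟩
        · simp at hnil
        · have heq' : (rest.reverse ++ [c]) ++ [b, a] = m ++ [y, x] := by
            simpa [List.append_assoc] using heq
          obtain ⟨h1, h2⟩ := List.append_inj' heq' rfl
          obtain ⟨hb, ha, -⟩ : b = y ∧ a = x ∧ ([] : List Int) = [] := by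
            simpa using h2
          subst hb ha h1
          exact Or.inl ⟨(e2.symm : a = b), hm⟩
        · obtain ⟨h1, h2⟩ := List.append_inj' heq rfl
          obtain ⟨hc, hb, ha, -⟩ : c = z ∧ b = y ∧ a = x ∧ ([] : List Int) = [] := by
            simpa using h2
          subst hc hb ha h1
          refine Or.inr ⟨?_, hm⟩
          rcases e3 with ⟨e1, e2⟩ | ⟨e1, e2⟩
          · exact Or.inl ⟨e2.symm, e1.symm⟩
          · exact Or.inr ⟨e2, e1⟩

theorem canR_rev_eq_canB (l : List Int) : canR l.reverse = canB l := by
  rw [Bool.eq_iff_iff, canR_iff, List.reverse_reverse, canB_iff]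

-- peeling one element off the back of a prefix
theorem take_reverse_succ (nums : List Int) (m : Nat) (h : m < nums.length) :
    (nums.take (m + 1)).reverse = nums.getD m 0 :: (nums.take m).reverse := by
  rw [List.take_add_one, List.getElem?_eq_getElem h, List.getD_eq_getElem _ _ h]
  simp

-- the recurrence A's loop body implements, in terms of canR of reversed prefixes
theorem canR_take_succ3 (nums : List Int) (m : Nat) (h : m + 3 ≤ nums.length) :
    canR ((nums.take (m + 3)).reverse) =
      ((nums.getD (m + 2) 0 == nums.getD (m + 1) 0 && canR ((nums.take (m + 1)).reverse)) ||
       (((nums.getD (m + 2) 0 == nums.getD (m + 1) 0 && nums.getD (m + 1) 0 == nums.getD m 0) ||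
         (nums.getD (m + 2) 0 - nums.getD (m + 1) 0 == 1 && nums.getD (m + 1) 0 - nums.getD m 0 == 1)) &&
        canR ((nums.take m).reverse))) := by
  have h2 : m + 2 < nums.length := by omega
  have h1 : m + 1 < nums.length := by omega
  have h0 : m < nums.length := by omega
  rw [take_reverse_succ nums (m + 2) h2, take_reverse_succ nums (m + 1) h1,
    take_reverse_succ nums m h0, canR]

theorem beq_symm_int (x y : Int) : (x == y) = (y == x) := by
  rw [Bool.eq_iff_iff, beq_iff_eq, beq_iff_eq]
  exact eq_comm

-- A's loop invariant
theorem A_loop (nums : List Int) (hn : 2 ≤ nums.length) :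
    ∀ k, k + 2 ≤ nums.length →
      (List.range' 2 k).foldl (fun dp i =>
        let cur :=
          (nums.getD i 0 == nums.getD (i - 1) 0 && dp.2.1) ||
          ((nums.getD i 0 == nums.getD (i - 1) 0 && nums.getD (i - 1) 0 == nums.getD (i - 2) 0) && dp.1) ||
          ((nums.getD i 0 - nums.getD (i - 1) 0 == 1 && nums.getD (i - 1) 0 - nums.getD (i - 2) 0 == 1) && dp.1)
        (dp.2.1, dp.2.2, cur)) (true, false, nums.getD 0 0 == nums.getD 1 0) =
      (canR ((nums.take k).reverse), canR ((nums.take (k + 1)).reverse),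
        canR ((nums.take (k + 2)).reverse)) := by
  intro k
  induction k with
  | zero =>
      intro hk
      have h1 : (1 : Nat) < nums.length := by omega
      have h0 : (0 : Nat) < nums.length := by omega
      rw [List.range'_zero, List.foldl_nil]
      rw [take_reverse_succ nums 1 h1, take_reverse_succ nums 0 h0]
      refine Prod.ext (by simp [canR]) (Prod.ext (by simp [canR]) ?_)
      simp only [List.take_zero, List.reverse_nil]
      simp [canR, beq_symm_int]
  | succ k ih =>
      intro hk
      have hk' : k + 2 ≤ nums.length := by omega
      rw [List.range'_concat, List.foldl_append, ih hk', List.foldl_cons, List.foldl_nil]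
      have e1 : 2 + 1 * k = k + 2 := by ring
      have e2 : k + 2 - 1 = k + 1 := by omega
      have e3 : k + 2 - 2 = k := by omega
      simp only [e1, e2, e3]
      refine Prod.ext rfl (Prod.ext rfl ?_)
      have := canR_take_succ3 nums k (by omega)
      rw [show k + 3 = k + 1 + 2 from rfl] at this
      rw [this]
      cases hpair : (nums.getD (k + 2) 0 == nums.getD (k + 1) 0) <;>
        cases hA : canR ((nums.take (k + 1)).reverse) <;>
        cases hB : canR ((nums.take k).reverse) <;> simp

-- A computes canR of the reversed input (false on length ≤ 1)
theorem A_eq (nums : List Int) :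
    CheckValidPartition nums = if nums.length ≤ 1 then false else canR nums.reverse := by
  unfold CheckValidPartition
  by_cases h1 : nums.length = 1
  · simp [h1]
  · by_cases h0 : nums.length = 0
    · simp [List.length_eq_zero_iff.mp h0]
    · have hn : 2 ≤ nums.length := by omega
      have hif : (if 1 < nums.length then nums.getD 0 0 == nums.getD 1 0 else false) =
          (nums.getD 0 0 == nums.getD 1 0) := by
        rw [if_pos (by omega)]
      simp only [h1, if_false, hif]
      rw [A_loop nums hn (nums.length - 2) (by omega)]
      have : nums.length - 2 + 2 = nums.length := by omega
      rw [this, List.take_length]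
      rw [if_neg (by omega)]

-- peeling one element off the front of a suffix
theorem drop_cons (nums : List Int) (j : Nat) (h : j < nums.length) :
    nums.drop j = nums.getD j 0 :: nums.drop (j + 1) := by
  rw [List.drop_eq_getElem_cons h, List.getD_eq_getElem _ _ h]

-- B's loop invariant
theorem B_loop (nums : List Int) :
    ∀ k, k ≤ nums.length →
      ∀ d : PySem.Dict Nat Bool,
        (∀ j, k ≤ j → j ≤ nums.length → d.getD j false = canB (nums.drop j)) →
        ∀ j, j ≤ nums.length →
          ((List.range k).reverse.foldl (fun can i =>
            let ok := false
            let ok := if i + 2 ≤ nums.length && nums.getD i 0 == nums.getD (i + 1) 0 then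
                can.getD (i + 2) false else ok
            let ok := if !ok && i + 3 ≤ nums.length &&
                ((nums.getD i 0 == nums.getD (i + 1) 0 && nums.getD (i + 1) 0 == nums.getD (i + 2) 0) ||
                 (nums.getD (i + 1) 0 - nums.getD i 0 == 1 && nums.getD (i + 2) 0 - nums.getD (i + 1) 0 == 1))
              then can.getD (i + 3) false else ok
            can.insert i ok) d).getD j false = canB (nums.drop j) := by
  intro k
  induction k with
  | zero =>
      intro _ d hd j hj
      rw [List.range_zero, List.reverse_nil, List.foldl_nil]
      exact hd j (Nat.zero_le j) hj
  | succ k ih =>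
      intro hk d hd j hj
      have hrev : (List.range (k + 1)).reverse = k :: (List.range k).reverse := by
        rw [List.range_succ, List.reverse_append]; simp
      rw [hrev, List.foldl_cons]
      refine ih (by omega) _ ?_ j hj
      intro j' hj1 hj2
      simp only
      rw [PySem.Dict.getD_insert]
      by_cases hjk : j' = k
      · subst hjk
        rw [if_pos rfl]
        have hlt : j' < nums.length := by omega
        by_cases h3 : j' + 3 ≤ nums.length
        · -- at least three elements remain
          have hc2 : d.getD (j' + 2) false = canB (nums.getD (j' + 2) 0 :: nums.drop (j' + 3)) := by
            rw [hd _ (by omega) (by omega), drop_cons nums (j' + 2) (by omega)]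
          have hc3 : d.getD (j' + 3) false = canB (nums.drop (j' + 3)) :=
            hd _ (by omega) (by omega)
          have hshape : nums.drop j' =
              nums.getD j' 0 :: nums.getD (j' + 1) 0 :: nums.getD (j' + 2) 0 :: nums.drop (j' + 3) := by
            rw [drop_cons nums j' hlt, drop_cons nums (j' + 1) (by omega),
              drop_cons nums (j' + 2) (by omega)]
          rw [hshape]
          simp only [canB, hc2, hc3]
          have ht2 : j' + 2 ≤ nums.length := by omega
          cases hP : (nums.getD j' 0 == nums.getD (j' + 1) 0) <;>
            cases hQ : canB (nums.getD (j' + 2) 0 :: nums.drop (j' + 3)) <;>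
            cases hC : (nums.getD (j' + 1) 0 == nums.getD (j' + 2) 0) <;>
            cases hA1 : (nums.getD (j' + 1) 0 - nums.getD j' 0 == 1) <;>
            cases hA2 : (nums.getD (j' + 2) 0 - nums.getD (j' + 1) 0 == 1) <;>
            simp [hP, hQ, hC, hA1, hA2, ht2, h3]
        · by_cases h2 : j' + 2 ≤ nums.length
          · -- exactly two elements remain
            have hnil : nums.drop (j' + 2) = [] := by
              rw [show j' + 2 = nums.length from by omega, List.drop_length]
            have hc2 : d.getD (j' + 2) false = true := by
              rw [hd _ (by omega) (by omega), hnil]; rfl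
            have hshape : nums.drop j' = [nums.getD j' 0, nums.getD (j' + 1) 0] := by
              rw [drop_cons nums j' hlt, drop_cons nums (j' + 1) (by omega),
                show j' + 1 + 1 = nums.length from by omega, List.drop_length]
            have hne3 : ¬ (j' + 3 ≤ nums.length) := by omega
            rw [if_neg (by simp [hne3]), hshape]
            simp only [canB, hc2]
            cases hP : (nums.getD j' 0 == nums.getD (j' + 1) 0) <;> simp [hP, h2]
          · -- exactly one element remains
            have hshape : nums.drop j' = [nums.getD j' 0] := by
              rw [drop_cons nums j' hlt, show j' + 1 = nums.length from by omega, List.drop_length]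
            have hne2 : ¬ (j' + 2 ≤ nums.length) := by omega
            have hne3 : ¬ (j' + 3 ≤ nums.length) := by omega
            rw [if_neg (by simp [hne3]), if_neg (by simp [hne2]), hshape]
            simp [canB]
      · rw [if_neg hjk]
        exact hd j' (by omega) hj2

-- B computes canB (false on the empty input)
theorem B_eq (nums : List Int) :
    CheckValidPartition_alt nums = if nums.length = 0 then false else canB nums := by
  unfold CheckValidPartition_alt
  by_cases h0 : nums.length = 0
  · simp [h0]
  · rw [if_neg h0, if_neg h0]
    have := B_loop nums nums.length le_rfl (PySem.Dict.empty.insert nums.length true)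
      (fun j hj1 hj2 => by
        have : j = nums.length := by omega
        subst this
        rw [PySem.Dict.getD_insert, if_pos rfl, List.drop_length, canB])
      0 (Nat.zero_le _)
    rw [this, List.drop_zero]

-- ===== VERDICT (by name: the statement is the Claim_ definition above) =====
theorem CheckValidPartition_spec : Claim_equal_CheckValidPartition := by
  intro nums _
  show CheckValidPartition nums = CheckValidPartition_alt nums
  rw [A_eq, B_eq, ← canR_rev_eq_canB]
  match nums with
  | [] => simp
  | [a] => simp [canR]
  | a :: b :: r => simp
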